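-- pv_equiv track=rewrite | github.com/DominikWojtanowski/Matura-informatyka | 2008 - Maj/Zadanie_2/Zadanie_2.py | REG3
-- ===== SOURCE A (Python) =====
-- def REG3(w: str) -> str:
--     if w.__len__() == 1:
--         return "TAK"
--     elif w.__len__() > 1 and w.__len__() % 3 != 0:
--         return  "NIE"
--     elif w.__len__() > 1 and w.__len__() % 3 == 0:
--         onePart = w.__len__() // 3
--
--         w1 = w[:onePart]
--         x = w[onePart:onePart*2]
--         w2 = w[onePart*2:]
--
--         if w1 != w2 and w1 != x:
--             return "NIE"
--         else:
--             return REG3(w1)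
-- ===== SOURCE B (Python) =====
-- def REG3(w: str) -> str:
--     # Iterative: only the current prefix LENGTH t changes; segments are compared
--     # in place by index, no substring objects are ever built.
--     t = len(w)
--     while t > 1:
--         if t % 3:
--             return "NIE"
--         t //= 3
--         eq_mid = all(w[i] == w[t + i] for i in range(t))
--         eq_right = all(w[i] == w[2 * t + i] for i in range(t))
--         if not (eq_mid or eq_right):
--             return "NIE"
--     return "TAK" if t == 1 else "NIE"
-- ===== Notes on version B (the rewrite author's own statement) =====
-- stated objective: alternative
-- what changed: Replaces the tail recursion that builds substring objects at every level with an iterative loop over the prefix length only, comparing the three segments in place by index so no intermediate strings are created.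
-- outside the precondition, e.g. on REG3(''): A returns None, B returns 'NIE'
import Mathlib
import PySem

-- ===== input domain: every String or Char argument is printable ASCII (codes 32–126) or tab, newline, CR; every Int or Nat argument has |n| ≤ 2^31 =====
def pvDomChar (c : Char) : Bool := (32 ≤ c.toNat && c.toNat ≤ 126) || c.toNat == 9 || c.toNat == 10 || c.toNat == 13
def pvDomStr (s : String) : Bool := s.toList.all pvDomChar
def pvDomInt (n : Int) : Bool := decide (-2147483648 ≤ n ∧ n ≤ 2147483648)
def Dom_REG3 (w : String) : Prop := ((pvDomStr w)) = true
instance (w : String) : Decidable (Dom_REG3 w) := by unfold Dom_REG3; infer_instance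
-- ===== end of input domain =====

-- B replaces A's tail recursion on substring objects with an iterative loop over the
-- prefix length only, comparing the three segments in place by index (objective: alternative).

-- ===== PORT A =====
-- termination helper: the first third is shorter than the whole
theorem pvSliceLen_lt (w : String) (k : Int) (h : 0 ≤ k) (h2 : k < (w.toList.length : Int)) :
    (PySem.Str.slice w none (some k)).toList.length < w.toList.length := by
  have : (PySem.Str.slice w none (some k)).toList = w.toList.take k.toNat := by
    simp [PySem.Str.slice, PySem.Chars.slice, PySem.List.slice_to w.toList h]
  rw [this, List.length_take]
  omega

def REG3 (w : String) : String :=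
  if PySem.Str.len w = 1 then "TAK"
  else if PySem.Str.len w > 1 ∧ PySem.Int.mod (PySem.Str.len w) 3 ≠ 0 then "NIE"
  else if hc : PySem.Str.len w > 1 ∧ PySem.Int.mod (PySem.Str.len w) 3 = 0 then
    let onePart := PySem.Int.floordiv (PySem.Str.len w) 3
    let w1 := PySem.Str.slice w none (some onePart)
    let x := PySem.Str.slice w (some onePart) (some (onePart * 2))
    let w2 := PySem.Str.slice w (some (onePart * 2)) none
    if w1 ≠ w2 ∧ w1 ≠ x then "NIE" else REG3 w1
  else ""  -- Python falls through returning None here (only len 0; excluded by Pre_)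
termination_by w.toList.length
decreasing_by
  have h1 := hc.1
  rw [PySem.Str.len_eq] at h1
  have hfd : PySem.Int.floordiv (PySem.Str.len w) 3 = ((w.toList.length / 3 : Nat) : Int) := by
    rw [PySem.Str.len_eq]
    simp [PySem.Int.floordiv, Int.fdiv_eq_ediv]
  rw [hfd]
  exact pvSliceLen_lt w _ (by omega) (by omega)

-- ===== PORT B =====
def REG3loop (cs : List Char) (t : Nat) : String :=
  if t > 1 then
    if t % 3 ≠ 0 then "NIE"
    else
      let t' := t / 3
      let eqMid := (List.range t').all (fun i => cs.getD i ' ' == cs.getD (t' + i) ' ')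
      let eqRight := (List.range t').all (fun i => cs.getD i ' ' == cs.getD (2 * t' + i) ' ')
      if ¬ (eqMid || eqRight) then "NIE" else REG3loop cs t'
  else if t = 1 then "TAK" else "NIE"
termination_by t
decreasing_by exact Nat.div_lt_self (by omega) (by omega)

def REG3_alt (w : String) : String := REG3loop w.toList w.toList.length

-- ===== PRECONDITION & SPEC =====
-- Pre_ excludes only the empty string, where A returns None (no str value) while B returns its rejection answer.
def Pre_REG3 (w : String) : Prop := w ≠ ""
instance (w : String) : Decidable (Pre_REG3 w) := by unfold Pre_REG3; infer_instance
def pvWitness_REG3 : String := "aba"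

def Spec_REG3 (w : String) (out : String) : Prop := out = REG3_alt w
instance (w : String) (out : String) : Decidable (Spec_REG3 w out) := by unfold Spec_REG3; infer_instance

-- ===== CLAIM (what is proved, stated in full; the proofs are below) =====
def Claim_equal_REG3 : Prop := ∀ (w : String), Dom_REG3 w → Pre_REG3 w → Spec_REG3 w (REG3 w)

-- ===== LEMMAS AND PROOFS =====

-- pointwise index comparison over range n ↔ equality of the two length-n segments
theorem pvAllEq (cs : List Char) (n k : Nat) (hn : n + k ≤ cs.length) :
    ((List.range n).all (fun i => cs.getD i ' ' == cs.getD (k + i) ' ') = true) ↔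
      cs.take n = (cs.drop k).take n := by
  rw [List.all_eq_true]
  have key : ∀ i (hi : i < n), (cs.getD i ' ' == cs.getD (k + i) ' ') =
      (cs[i]'(by omega) == cs[k+i]'(by omega)) := by
    intro i hi
    rw [List.getD_eq_getElem cs ' ' (by omega), List.getD_eq_getElem cs ' ' (by omega)]
  constructor
  · intro h
    apply List.ext_getElem
    · simp; omega
    · intro i h1 h2
      have hi : i < n := by simp at h1; omega
      have := h i (List.mem_range.mpr hi)
      rw [key i hi] at this
      simp only [beq_iff_eq] at this
      simpa [List.getElem_take, List.getElem_drop] using this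
  · intro h i hi
    have hi' : i < n := List.mem_range.mp hi
    rw [key i hi']
    simp only [beq_iff_eq]
    have h1 : cs[i]? = cs[k+i]? := by
      have := congrArg (fun l => l[i]?) h
      simpa [List.getElem?_take, hi', List.getElem?_drop] using this
    rw [List.getElem?_eq_getElem (by omega : i < cs.length),
        List.getElem?_eq_getElem (by omega : k + i < cs.length)] at h1
    exact Option.some.inj h1

theorem pvTakeToList (cs : List Char) (k : Nat) :
    (PySem.Str.slice (String.ofList cs) none (some (k : Int))).toList = cs.take k := by
  simp [PySem.Str.slice, PySem.Chars.slice, PySem.List.slice_to_natCast]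

-- the heart of the proof: A on the length-t prefix equals B's loop at length t
theorem pvMain (cs : List Char) (t : Nat) (ht : 1 ≤ t) (hle : t ≤ cs.length) :
    REG3 (String.ofList (cs.take t)) = REG3loop cs t := by
  induction t using Nat.strong_induction_on with
  | _ t ih =>
  have hlen : (String.ofList (cs.take t)).toList.length = t := by
    simp; omega
  have hlenI : PySem.Str.len (String.ofList (cs.take t)) = (t : Int) := by
    rw [PySem.Str.len_eq, hlen]
  rw [REG3, REG3loop, hlenI]
  by_cases h1 : t = 1
  · subst h1
    simp only [show ((1 : Nat) : Int) = (1 : Int) from rfl]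
    norm_num
  · have ht1 : 1 < t := by omega
    have hne1 : ¬ ((t : Int) = 1) := by omega
    have hBgt : (1 : Nat) < t := ht1
    rw [if_neg hne1, if_pos hBgt]
    by_cases h3 : t % 3 = 0
    · -- divisible by 3: the segment comparisons
      have hmod : PySem.Int.mod (t : Int) 3 = 0 := by
        rw [PySem.Int.mod_eq_zero_iff_dvd]; omega
      have hcond2 : ¬ ((t : Int) > 1 ∧ PySem.Int.mod (t : Int) 3 ≠ 0) := by
        intro h; exact h.2 hmod
      have hcond3 : (t : Int) > 1 ∧ PySem.Int.mod (t : Int) 3 = 0 := ⟨by omega, hmod⟩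
      have hBm : ¬ (t % 3 ≠ 0) := by omega
      rw [if_neg hcond2, dif_pos hcond3, if_neg hBm]
      have hfd : PySem.Int.floordiv (t : Int) 3 = ((t / 3 : Nat) : Int) := by
        simp [PySem.Int.floordiv, Int.fdiv_eq_ediv]
      simp only [hfd]
      set t' := t / 3 with ht'
      have h3t : 3 * t' = t := by omega
      -- identify the three slices of the prefix
      have hw1 : (PySem.Str.slice (String.ofList (cs.take t)) none (some ((t' : Nat) : Int))).toList
          = cs.take t' := by
        rw [pvTakeToList, List.take_take]; congr 1; omega
      have hx : (PySem.Str.slice (String.ofList (cs.take t)) (some ((t' : Nat) : Int))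
            (some (((t' : Nat) : Int) * 2))).toList = (cs.drop t').take t' := by
        have h2c : ((t' : Nat) : Int) * 2 = ((2 * t' : Nat) : Int) := by push_cast; ring
        rw [h2c]
        simp only [PySem.Str.slice, PySem.Chars.slice, PySem.List.slice_natCast,
          String.toList_ofList]
        rw [List.drop_take, List.take_take]
        congr 1
        omega
      have hw2 : (PySem.Str.slice (String.ofList (cs.take t)) (some (((t' : Nat) : Int) * 2))
            none).toList = (cs.drop (2 * t')).take t' := by
        have h2c : ((t' : Nat) : Int) * 2 = ((2 * t' : Nat) : Int) := by push_cast; ring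
        rw [h2c]
        simp only [PySem.Str.slice, PySem.Chars.slice, PySem.List.slice_from_natCast,
          String.toList_ofList]
        rw [List.drop_take]
        congr 1; omega
      have hEqMid : (((List.range t').all
            (fun i => cs.getD i ' ' == cs.getD (t' + i) ' ')) = true) ↔
          PySem.Str.slice (String.ofList (cs.take t)) none (some ((t' : Nat) : Int)) =
            PySem.Str.slice (String.ofList (cs.take t)) (some ((t' : Nat) : Int))
              (some (((t' : Nat) : Int) * 2)) := by
        rw [pvAllEq cs t' t' (by omega)]
        rw [← String.toList_inj, hw1, hx]
      have hEqRight : (((List.range t').all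
            (fun i => cs.getD i ' ' == cs.getD (2 * t' + i) ' ')) = true) ↔
          PySem.Str.slice (String.ofList (cs.take t)) none (some ((t' : Nat) : Int)) =
            PySem.Str.slice (String.ofList (cs.take t)) (some (((t' : Nat) : Int) * 2)) none := by
        rw [pvAllEq cs t' (2 * t') (by omega)]
        rw [← String.toList_inj, hw1, hw2]
      by_cases hcond : ((List.range t').all (fun i => cs.getD i ' ' == cs.getD (t' + i) ' ') ||
          (List.range t').all (fun i => cs.getD i ' ' == cs.getD (2 * t' + i) ' ')) = true
      · -- some pair equal: both recurse
        have hBno : ¬ (¬ ((List.range t').all (fun i => cs.getD i ' ' == cs.getD (t' + i) ' ') ||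
            (List.range t').all (fun i => cs.getD i ' ' == cs.getD (2 * t' + i) ' ')) = true) :=
          not_not_intro hcond
        have hAcond : ¬ (PySem.Str.slice (String.ofList (cs.take t)) none (some ((t' : Nat) : Int)) ≠
              PySem.Str.slice (String.ofList (cs.take t)) (some (((t' : Nat) : Int) * 2)) none ∧
            PySem.Str.slice (String.ofList (cs.take t)) none (some ((t' : Nat) : Int)) ≠
              PySem.Str.slice (String.ofList (cs.take t)) (some ((t' : Nat) : Int))
                (some (((t' : Nat) : Int) * 2))) := by
          rcases Bool.or_eq_true_iff.mp hcond with hm | hr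
          · intro hand; exact hand.2 (hEqMid.mp hm)
          · intro hand; exact hand.1 (hEqRight.mp hr)
        rw [if_neg hAcond, if_neg hBno]
        have hw1s : PySem.Str.slice (String.ofList (cs.take t)) none (some ((t' : Nat) : Int)) =
            String.ofList (cs.take t') := by
          apply String.toList_inj.mp
          rw [hw1]
          simp
        rw [hw1s]
        exact ih t' (by omega) (by omega) (by omega)
      · -- neither pair equal: both return NIE
        have hBno : (¬ ((List.range t').all (fun i => cs.getD i ' ' == cs.getD (t' + i) ' ') ||
            (List.range t').all (fun i => cs.getD i ' ' == cs.getD (2 * t' + i) ' ')) = true) :=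
          hcond
        have hm : ¬ ((List.range t').all (fun i => cs.getD i ' ' == cs.getD (t' + i) ' ') = true) := by
          intro h; exact hcond (by rw [Bool.or_eq_true_iff]; exact Or.inl h)
        have hr : ¬ ((List.range t').all (fun i => cs.getD i ' ' == cs.getD (2 * t' + i) ' ') = true) := by
          intro h; exact hcond (by rw [Bool.or_eq_true_iff]; exact Or.inr h)
        rw [if_pos ⟨fun h => hr (hEqRight.mpr h), fun h => hm (hEqMid.mpr h)⟩, if_pos hBno]
    · -- not divisible by 3: both return NIE
      have hmod : PySem.Int.mod (t : Int) 3 ≠ 0 := by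
        rw [Ne, PySem.Int.mod_eq_zero_iff_dvd]; omega
      have hBm : (t % 3 ≠ 0) := h3
      rw [if_pos ⟨by omega, hmod⟩, if_pos hBm]

-- ===== VERDICT (by name: the statement is the Claim_ definition above) =====
theorem REG3_spec : Claim_equal_REG3 := by
  intro w _ hpre
  unfold Spec_REG3 REG3_alt
  have hne : w.toList.length ≥ 1 := by
    by_contra h
    have : w.toList = [] := by
      cases hl : w.toList with
      | nil => rfl
      | cons a l => rw [hl] at h; simp at h
    exact hpre (by
      have := congrArg String.ofList this
      simpa using this)
  have := pvMain w.toList w.toList.length hne (le_refl _)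
  rw [List.take_length, String.ofList_toList] at this
  exact this
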